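-- pv_equiv track=rewrite | github.com/xMati278/Python | WEEK2/Podstawy_Szkolenie_8_Zadania/ex_10.py | count_pixels_with_contrasting_neighbors
-- ===== SOURCE A (Python) =====
-- def has_contrasting_neighbor(pixel, neighbors):
--     for neighbor in neighbors:
--         if abs(pixel - neighbor) > 128:
--             return True
--     return False
--
-- def count_pixels_with_contrasting_neighbors(pixel_values):
--     row_amount = len(pixel_values)
--     pixel_amount = len(pixel_values[0])
--     count = 0
--
--     for i in range(row_amount):
--         for j in range(pixel_amount):
--             pixel = pixel_values[i][j]
--             neighbors = []
--             if i > 0: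
--                 neighbors.append(pixel_values[i - 1][j])
--             if i < row_amount - 1:
--                 neighbors.append(pixel_values[i + 1][j])
--             if j > 0:
--                 neighbors.append(pixel_values[i][j - 1])
--             if j < pixel_amount - 1:
--                 neighbors.append(pixel_values[i][j + 1])
--
--             if has_contrasting_neighbor(pixel, neighbors):
--                 count += 1
--
--     return count
-- ===== SOURCE B (Python) =====
-- def count_pixels_with_contrasting_neighbors(pixel_values):
--     n = len(pixel_values)
--     m = len(pixel_values[0])
--     marked = set()
--     for i in range(n):
--         row = pixel_values[i]
--         for j in range(m - 1):
--             if abs(row[j] - row[j + 1]) > 128: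
--                 marked.add((i, j))
--                 marked.add((i, j + 1))
--     for i in range(n - 1):
--         for j in range(m):
--             if abs(pixel_values[i][j] - pixel_values[i + 1][j]) > 128:
--                 marked.add((i, j))
--                 marked.add((i + 1, j))
--     return len(marked)
-- ===== Notes on version B (the rewrite author's own statement) =====
-- stated objective: alternative
-- what changed: Instead of gathering each pixel's neighbor list and scanning it, B makes one pass over horizontal and one over vertical adjacent pairs, marking both endpoints of every contrasting pair in a set, and returns the set's size.
import Mathlib
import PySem

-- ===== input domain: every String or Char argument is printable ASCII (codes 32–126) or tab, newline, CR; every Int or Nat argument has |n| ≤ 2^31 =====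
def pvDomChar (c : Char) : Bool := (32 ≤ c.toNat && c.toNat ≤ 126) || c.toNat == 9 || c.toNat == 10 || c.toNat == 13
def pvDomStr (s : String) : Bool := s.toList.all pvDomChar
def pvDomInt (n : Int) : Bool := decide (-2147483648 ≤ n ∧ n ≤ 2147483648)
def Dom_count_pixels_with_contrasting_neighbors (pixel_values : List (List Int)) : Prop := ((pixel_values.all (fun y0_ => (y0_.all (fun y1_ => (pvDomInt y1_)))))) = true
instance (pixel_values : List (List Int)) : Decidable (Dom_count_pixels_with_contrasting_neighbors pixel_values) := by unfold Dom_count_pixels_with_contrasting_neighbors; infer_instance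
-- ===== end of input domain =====

-- B replaces the per-pixel neighbor-list scan by a single pass over horizontal and vertical
-- adjacent pairs, marking both endpoints of each contrasting pair in a set (objective: alternative).

-- ===== PORT A =====
-- port of helper has_contrasting_neighbor (loop with early return → structural recursion)
def pyHasContrast (pixel : Int) : List Int → Bool
  | [] => false
  | nb :: rest => if 128 < |pixel - nb| then true else pyHasContrast pixel rest

def count_pixels_with_contrasting_neighbors (pixel_values : List (List Int)) : Int :=
  let row_amount : Int := pixel_values.length
  let pixel_amount : Int := (PySem.List.pyGetD pixel_values 0 []).length
  (PySem.List.pyRange 0 row_amount 1).foldl (fun count i =>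
    (PySem.List.pyRange 0 pixel_amount 1).foldl (fun count j =>
      let pixel := PySem.List.pyGetD (PySem.List.pyGetD pixel_values i []) j 0
      let neighbors : List Int := []
      let neighbors := if 0 < i then neighbors ++ [PySem.List.pyGetD (PySem.List.pyGetD pixel_values (i - 1) []) j 0] else neighbors
      let neighbors := if i < row_amount - 1 then neighbors ++ [PySem.List.pyGetD (PySem.List.pyGetD pixel_values (i + 1) []) j 0] else neighbors
      let neighbors := if 0 < j then neighbors ++ [PySem.List.pyGetD (PySem.List.pyGetD pixel_values i []) (j - 1) 0] else neighbors
      let neighbors := if j < pixel_amount - 1 then neighbors ++ [PySem.List.pyGetD (PySem.List.pyGetD pixel_values i []) (j + 1) 0] else neighbors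
      if pyHasContrast pixel neighbors then count + 1 else count) count) 0

-- ===== PORT B =====
def count_pixels_with_contrasting_neighbors_alt (pixel_values : List (List Int)) : Int :=
  let n : Int := pixel_values.length
  let m : Int := (PySem.List.pyGetD pixel_values 0 []).length
  let marked : PySem.Set (Int × Int) := PySem.Set.empty
  let marked := (PySem.List.pyRange 0 n 1).foldl (fun mk i =>
    let row := PySem.List.pyGetD pixel_values i []
    (PySem.List.pyRange 0 (m - 1) 1).foldl (fun mk j =>
      if 128 < |PySem.List.pyGetD row j 0 - PySem.List.pyGetD row (j + 1) 0| then
        PySem.Set.add (PySem.Set.add mk (i, j)) (i, j + 1)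
      else mk) mk) marked
  let marked := (PySem.List.pyRange 0 (n - 1) 1).foldl (fun mk i =>
    (PySem.List.pyRange 0 m 1).foldl (fun mk j =>
      if 128 < |PySem.List.pyGetD (PySem.List.pyGetD pixel_values i []) j 0 - PySem.List.pyGetD (PySem.List.pyGetD pixel_values (i + 1) []) j 0| then
        PySem.Set.add (PySem.Set.add mk (i, j)) (i + 1, j)
      else mk) mk) marked
  PySem.Set.len marked

-- ===== PRECONDITION & SPEC =====
-- Pre_ excludes exactly the inputs where Python A raises IndexError: the empty list
-- (pixel_values[0]) and grids with a row shorter than row 0 (pixel_values[i][j]).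
def Pre_count_pixels_with_contrasting_neighbors (pixel_values : List (List Int)) : Prop :=
  pixel_values ≠ [] ∧ ∀ row ∈ pixel_values, pixel_values.headI.length ≤ row.length

instance (pixel_values : List (List Int)) : Decidable (Pre_count_pixels_with_contrasting_neighbors pixel_values) := by unfold Pre_count_pixels_with_contrasting_neighbors; infer_instance

def pvWitness_count_pixels_with_contrasting_neighbors : List (List Int) := [[0, 200], [300, 10]]

def Spec_count_pixels_with_contrasting_neighbors (pixel_values : List (List Int)) (out : Int) : Prop := out = count_pixels_with_contrasting_neighbors_alt pixel_values
instance (pixel_values : List (List Int)) (out : Int) : Decidable (Spec_count_pixels_with_contrasting_neighbors pixel_values out) := by unfold Spec_count_pixels_with_contrasting_neighbors; infer_instance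

-- ===== CLAIM (what is proved, stated in full; the proofs are below) =====
def Claim_equal_count_pixels_with_contrasting_neighbors : Prop := ∀ (pixel_values : List (List Int)), Dom_count_pixels_with_contrasting_neighbors pixel_values → Pre_count_pixels_with_contrasting_neighbors pixel_values → Spec_count_pixels_with_contrasting_neighbors pixel_values (count_pixels_with_contrasting_neighbors pixel_values)

-- ===== LEMMAS AND PROOFS =====

-- pixel_values[i][j] with the ports' defaults
def pvPx (pv : List (List Int)) (i j : Int) : Int :=
  PySem.List.pyGetD (PySem.List.pyGetD pv i []) j 0

-- A's per-pixel test, with the same let-structure as the port (defeq to the port's body)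
def pvCondA (pv : List (List Int)) (n m i j : Int) : Bool :=
  let pixel := PySem.List.pyGetD (PySem.List.pyGetD pv i []) j 0
  let neighbors : List Int := []
  let neighbors := if 0 < i then neighbors ++ [PySem.List.pyGetD (PySem.List.pyGetD pv (i - 1) []) j 0] else neighbors
  let neighbors := if i < n - 1 then neighbors ++ [PySem.List.pyGetD (PySem.List.pyGetD pv (i + 1) []) j 0] else neighbors
  let neighbors := if 0 < j then neighbors ++ [PySem.List.pyGetD (PySem.List.pyGetD pv i []) (j - 1) 0] else neighbors
  let neighbors := if j < m - 1 then neighbors ++ [PySem.List.pyGetD (PySem.List.pyGetD pv i []) (j + 1) 0] else neighbors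
  pyHasContrast pixel neighbors

theorem pvFoldlCount (js : List Int) (p : Int → Bool) (c : Int) :
    js.foldl (fun c j => if p j then c + 1 else c) c = c + ((js.filter p).length : Int) := by
  induction js generalizing c with
  | nil => simp
  | cons a t ih =>
    by_cases h : p a
    · simp [List.foldl_cons, h, ih]
      omega
    · simp [List.foldl_cons, h, ih]

theorem pvFoldl2Count (is js : List Int) (g : Int → Int → Bool) (c : Int) :
    is.foldl (fun c i => js.foldl (fun c j => if g i j then c + 1 else c) c) c
      = c + ((is.flatMap (fun i => (js.filter (g i)).map (fun j => (i, j)))).length : Int) := by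
  induction is generalizing c with
  | nil => simp
  | cons a t ih =>
    rw [List.foldl_cons, pvFoldlCount, ih, List.flatMap_cons]
    push_cast [List.length_append, List.length_map]
    ring

-- A's value as the length of the filtered grid list
theorem pvA_eq (pv : List (List Int)) :
    count_pixels_with_contrasting_neighbors pv
      = (((PySem.List.pyRange 0 (pv.length : Int) 1).flatMap (fun i =>
          (((PySem.List.pyRange 0 ((PySem.List.pyGetD pv 0 []).length : Int) 1).filter
            (fun j => pvCondA pv (pv.length : Int) ((PySem.List.pyGetD pv 0 []).length : Int) i j)).map
            (fun j => (i, j))))).length : Int) := by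
  exact (pvFoldl2Count _ _ _ 0).trans (zero_add _)

-- membership in a fold of a set-building step
theorem pvMemFoldl {α β : Type} [BEq α] [LawfulBEq α]
    (f : PySem.Set α → β → PySem.Set α) (C : β → α → Prop)
    (h : ∀ s y x, x ∈ f s y ↔ x ∈ s ∨ C y x) :
    ∀ (l : List β) (s : PySem.Set α) (x : α), x ∈ l.foldl f s ↔ x ∈ s ∨ ∃ y ∈ l, C y x := by
  intro l
  induction l with
  | nil => simp
  | cons a t ih =>
    intro s x
    simp only [List.foldl_cons, ih, h, List.mem_cons]
    constructor
    · rintro ((hs | hc) | ⟨y, hy, hc⟩)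
      · exact Or.inl hs
      · exact Or.inr ⟨a, Or.inl rfl, hc⟩
      · exact Or.inr ⟨y, Or.inr hy, hc⟩
    · rintro (hs | ⟨y, (rfl | hy), hc⟩)
      · exact Or.inl (Or.inl hs)
      · exact Or.inl (Or.inr hc)
      · exact Or.inr ⟨y, hy, hc⟩

theorem pvNodupFoldl {α β : Type}
    (f : PySem.Set α → β → PySem.Set α)
    (h : ∀ s y, s.Nodup → (f s y).Nodup) :
    ∀ (l : List β) (s : PySem.Set α), s.Nodup → (l.foldl f s).Nodup := by
  intro l
  induction l with
  | nil => intro s hs; simpa using hs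
  | cons a t ih => intro s hs; exact ih _ (h s a hs)

-- generic grid/marked forms (n, m abstract), instantiated at n = len(pv), m = len(pv[0])
def pvGridG (pv : List (List Int)) (n m : Int) : List (Int × Int) :=
  (PySem.List.pyRange 0 n 1).flatMap (fun i =>
    ((PySem.List.pyRange 0 m 1).filter (fun j => pvCondA pv n m i j)).map (fun j => (i, j)))

def pvMarkedG (pv : List (List Int)) (n m : Int) : PySem.Set (Int × Int) :=
  (PySem.List.pyRange 0 (n - 1) 1).foldl (fun mk i =>
    (PySem.List.pyRange 0 m 1).foldl (fun mk j =>
      if 128 < |pvPx pv i j - pvPx pv (i + 1) j| then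
        PySem.Set.add (PySem.Set.add mk (i, j)) (i + 1, j)
      else mk) mk)
  ((PySem.List.pyRange 0 n 1).foldl (fun mk i =>
    (PySem.List.pyRange 0 (m - 1) 1).foldl (fun mk j =>
      if 128 < |pvPx pv i j - pvPx pv i (j + 1)| then
        PySem.Set.add (PySem.Set.add mk (i, j)) (i, j + 1)
      else mk) mk) PySem.Set.empty)

theorem pvB_eq (pv : List (List Int)) :
    count_pixels_with_contrasting_neighbors_alt pv
      = ((pvMarkedG pv (pv.length : Int) ((PySem.List.pyGetD pv 0 []).length : Int)).length : Int) := rfl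

theorem pvMemStep {a : Type} [BEq a] [LawfulBEq a] (s : PySem.Set a) (c : Prop) [Decidable c] (u v x : a) :
    (x ∈ (if c then PySem.Set.add (PySem.Set.add s u) v else s)) ↔ x ∈ s ∨ (c ∧ (x = u ∨ x = v)) := by
  split_ifs with h <;> simp [PySem.Set.mem_add, h] <;> tauto

theorem pvMemPass {a : Type} [BEq a] [LawfulBEq a] (l : List Int) (cond : Int → Prop)
    [DecidablePred cond] (e1 e2 : Int → a) (s : PySem.Set a) (x : a) :
    (x ∈ l.foldl (fun mk j => if cond j then PySem.Set.add (PySem.Set.add mk (e1 j)) (e2 j) else mk) s)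
      ↔ x ∈ s ∨ ∃ j ∈ l, cond j ∧ (x = e1 j ∨ x = e2 j) :=
  pvMemFoldl _ (fun j x => cond j ∧ (x = e1 j ∨ x = e2 j))
    (fun s y x => pvMemStep s (cond y) (e1 y) (e2 y) x) l s x

theorem pvNodupPass {a : Type} [BEq a] [LawfulBEq a] (l : List Int) (cond : Int → Prop)
    [DecidablePred cond] (e1 e2 : Int → a) (s : PySem.Set a) (hs : s.Nodup) :
    (l.foldl (fun mk j => if cond j then PySem.Set.add (PySem.Set.add mk (e1 j)) (e2 j) else mk) s).Nodup := by
  refine pvNodupFoldl _ ?_ l s hs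
  intro s y h
  split_ifs with hc
  · exact PySem.Set.nodup_add _ _ (PySem.Set.nodup_add _ _ h)
  · exact h

theorem pvMarkedG_nodup (pv : List (List Int)) (n m : Int) : (pvMarkedG pv n m).Nodup := by
  unfold pvMarkedG
  refine pvNodupFoldl _ ?_ _ _ (pvNodupFoldl _ ?_ _ _ List.nodup_nil) <;>
    exact fun s y h => pvNodupPass _ _ _ _ _ h

theorem pvMarkedG_mem (pv : List (List Int)) (n m : Int) (x : Int × Int) :
    x ∈ pvMarkedG pv n m ↔
      (∃ i, (0 ≤ i ∧ i < n) ∧ ∃ j, (0 ≤ j ∧ j < m - 1) ∧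
        (128 < |pvPx pv i j - pvPx pv i (j + 1)| ∧ (x = (i, j) ∨ x = (i, j + 1)))) ∨
      (∃ i, (0 ≤ i ∧ i < n - 1) ∧ ∃ j, (0 ≤ j ∧ j < m) ∧
        (128 < |pvPx pv i j - pvPx pv (i + 1) j| ∧ (x = (i, j) ∨ x = (i + 1, j)))) := by
  unfold pvMarkedG
  rw [pvMemFoldl _
      (fun i x => ∃ j ∈ PySem.List.pyRange 0 m 1,
        128 < |pvPx pv i j - pvPx pv (i + 1) j| ∧ (x = (i, j) ∨ x = (i + 1, j)))
      (fun s y x => pvMemPass _ _ _ _ s x)]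
  rw [pvMemFoldl _
      (fun i x => ∃ j ∈ PySem.List.pyRange 0 (m - 1) 1,
        128 < |pvPx pv i j - pvPx pv i (j + 1)| ∧ (x = (i, j) ∨ x = (i, j + 1)))
      (fun s y x => pvMemPass _ _ _ _ s x)]
  simp only [PySem.Set.empty, List.not_mem_nil, false_or, PySem.List.mem_pyRange_one]

theorem pvNodupGrid (g : Int → List Int) :
    ∀ (is : List Int), is.Nodup → (∀ i, (g i).Nodup) →
      (is.flatMap (fun i => (g i).map (fun j => (i, j)))).Nodup := by
  intro is
  induction is with
  | nil => intro _ _; exact List.nodup_nil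
  | cons a t ih =>
    intro his hg
    simp only [List.nodup_cons] at his
    simp only [List.flatMap_cons, List.nodup_append]
    refine ⟨(hg a).map (fun j j' e => by simpa using congrArg Prod.snd e), ih his.2 hg, ?_⟩
    intro x hx y hy
    rw [List.mem_map] at hx
    obtain ⟨j, _, rfl⟩ := hx
    rw [List.mem_flatMap] at hy
    obtain ⟨i', hi', hmem⟩ := hy
    rw [List.mem_map] at hmem
    obtain ⟨j', _, rfl⟩ := hmem
    intro e
    injection e with e1 _
    exact his.1 (e1 ▸ hi')

theorem pvGridG_nodup (pv : List (List Int)) (n m : Int) : (pvGridG pv n m).Nodup := by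
  unfold pvGridG
  exact pvNodupGrid _ _ (PySem.List.nodup_pyRange_one 0 n)
    (fun i => List.Nodup.filter _ (PySem.List.nodup_pyRange_one 0 m))

theorem pvGridG_mem (pv : List (List Int)) (n m : Int) (x : Int × Int) :
    x ∈ pvGridG pv n m ↔
      (0 ≤ x.1 ∧ x.1 < n) ∧ (0 ≤ x.2 ∧ x.2 < m) ∧ pvCondA pv n m x.1 x.2 = true := by
  unfold pvGridG
  simp only [List.mem_flatMap, List.mem_map, List.mem_filter, PySem.List.mem_pyRange_one]
  constructor
  · rintro ⟨i, hi, j, ⟨hj, hc⟩, rfl⟩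
    exact ⟨hi, hj, hc⟩
  · rintro ⟨hi, hj, hc⟩
    exact ⟨x.1, hi, x.2, ⟨hj, hc⟩, rfl⟩

theorem pvHasContrast_any (p : Int) (l : List Int) :
    pyHasContrast p l = l.any (fun nb => decide (128 < |p - nb|)) := by
  induction l with
  | nil => rfl
  | cons a t ih =>
    by_cases h : 128 < |p - a| <;> simp [pyHasContrast, h, ih]

theorem pvCondA_iff (pv : List (List Int)) (n m i j : Int) :
    pvCondA pv n m i j = true ↔
      (0 < i ∧ 128 < |pvPx pv i j - pvPx pv (i - 1) j|) ∨
      (i < n - 1 ∧ 128 < |pvPx pv i j - pvPx pv (i + 1) j|) ∨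
      (0 < j ∧ 128 < |pvPx pv i j - pvPx pv i (j - 1)|) ∨
      (j < m - 1 ∧ 128 < |pvPx pv i j - pvPx pv i (j + 1)|) := by
  show pyHasContrast _ _ = true ↔ _
  rw [pvHasContrast_any]
  split_ifs <;> simp_all only [pvPx, List.any_append, List.any_cons, List.any_nil,
    List.nil_append, decide_eq_true_eq, Bool.or_eq_true, Bool.or_false,
    true_and, false_and, or_false, false_or] <;> tauto

theorem pvKey (pv : List (List Int)) (n m : Int) (x : Int × Int) :
    x ∈ pvMarkedG pv n m ↔ x ∈ pvGridG pv n m := by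
  obtain ⟨i, j⟩ := x
  rw [pvMarkedG_mem, pvGridG_mem, pvCondA_iff]
  simp only [Prod.mk.injEq]
  constructor
  · rintro (⟨i', ⟨hi0, hin⟩, j', ⟨hj0, hjm⟩, hc, (⟨rfl, rfl⟩ | ⟨rfl, rfl⟩)⟩ |
            ⟨i', ⟨hi0, hin⟩, j', ⟨hj0, hjm⟩, hc, (⟨rfl, rfl⟩ | ⟨rfl, rfl⟩)⟩)
    · exact ⟨⟨hi0, hin⟩, ⟨hj0, by omega⟩, Or.inr (Or.inr (Or.inr ⟨by omega, hc⟩))⟩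
    · refine ⟨⟨hi0, hin⟩, ⟨by omega, by omega⟩, Or.inr (Or.inr (Or.inl ⟨by omega, ?_⟩))⟩
      rw [abs_sub_comm]
      simpa using hc
    · exact ⟨⟨hi0, by omega⟩, ⟨hj0, hjm⟩, Or.inr (Or.inl ⟨by omega, hc⟩)⟩
    · refine ⟨⟨by omega, by omega⟩, ⟨hj0, hjm⟩, Or.inl ⟨by omega, ?_⟩⟩
      rw [abs_sub_comm]
      simpa using hc
  · rintro ⟨⟨hi0, hin⟩, ⟨hj0, hjm⟩, (⟨h, hc⟩ | ⟨h, hc⟩ | ⟨h, hc⟩ | ⟨h, hc⟩)⟩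
    · refine Or.inr ⟨i - 1, ⟨by omega, by omega⟩, j, ⟨hj0, hjm⟩, ?_, Or.inr ⟨by omega, rfl⟩⟩
      rw [abs_sub_comm]
      simpa using hc
    · exact Or.inr ⟨i, ⟨hi0, by omega⟩, j, ⟨hj0, hjm⟩, hc, Or.inl ⟨rfl, rfl⟩⟩
    · refine Or.inl ⟨i, ⟨hi0, hin⟩, j - 1, ⟨by omega, by omega⟩, ?_, Or.inr ⟨rfl, by omega⟩⟩
      rw [abs_sub_comm]
      simpa using hc
    · exact Or.inl ⟨i, ⟨hi0, hin⟩, j, ⟨hj0, by omega⟩, hc, Or.inl ⟨rfl, rfl⟩⟩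

-- ===== VERDICT (by name: the statement is the Claim_ definition above) =====
theorem count_pixels_with_contrasting_neighbors_spec : Claim_equal_count_pixels_with_contrasting_neighbors := by
  intro pv _ _
  unfold Spec_count_pixels_with_contrasting_neighbors
  rw [pvA_eq, pvB_eq]
  congr 1
  exact (((List.perm_ext_iff_of_nodup (pvMarkedG_nodup pv _ _) (pvGridG_nodup pv _ _)).2
    (pvKey pv _ _)).length_eq).symm
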